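-- pv_equiv track=rewrite | github.com/AshleyLab/minigene_pipeline | barcode_codon_rs.py | generate_variant_codon
-- ===== SOURCE A (Python) =====
-- def generate_variant_codon(variants):
--     variant_list = variants.split(", ")
--     variant_codons = []
--
--     ### Iterate through chunks of 3 consecutive variant values ###
--     for i in range(0, len(variant_list), 3):
--         triplet = variant_list[i:i+3]
--         #### Extract the {obs} values and join them into a codon ###
--         codon = "".join([variant.split(">")[1] for variant in triplet])
--         variant_codons.append(codon)
--
--     return ", ".join(variant_codons)
-- ===== SOURCE B (Python) =====
-- def generate_variant_codon(variants):
--     codons = []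
--     cur = []
--     for v in variants.split(", "):
--         cur.append(v.split(">")[1])
--         if len(cur) == 3:
--             codons.append("".join(cur))
--             cur = []
--     if cur:
--         codons.append("".join(cur))
--     return ", ".join(codons)
-- ===== Notes on version B (the rewrite author's own statement) =====
-- stated objective: alternative
-- what changed: B replaces A's index arithmetic (range(0,len,3) with list slicing and a per-triplet inner comprehension) by a single left-to-right pass carrying an accumulator of pending observed bases that is flushed into a codon every third variant.
import Mathlib
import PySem

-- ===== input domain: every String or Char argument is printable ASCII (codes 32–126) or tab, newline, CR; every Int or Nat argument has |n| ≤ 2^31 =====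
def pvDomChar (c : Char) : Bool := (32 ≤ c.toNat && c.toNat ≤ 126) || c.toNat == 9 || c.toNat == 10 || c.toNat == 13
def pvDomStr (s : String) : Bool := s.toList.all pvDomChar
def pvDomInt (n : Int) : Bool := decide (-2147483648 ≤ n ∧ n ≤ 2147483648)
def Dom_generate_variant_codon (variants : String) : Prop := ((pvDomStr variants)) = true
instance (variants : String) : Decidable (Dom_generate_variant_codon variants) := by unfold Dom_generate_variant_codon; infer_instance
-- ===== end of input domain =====

-- B replaces A's range(0,len,3)-and-slice chunking by a single pass with a pending-bases
-- accumulator flushed every third variant (objective: alternative decomposition, same cost).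

-- shared helper: s.split(sep) for a nonempty literal sep (Str.split? is none only when sep = "", exact here)
def pvSplit (s sep : String) : List String := (PySem.Str.split? s sep).getD []

-- observed base of one variant entry: variant.split(">")[1]; the "" default is never used
-- on inputs admitted by Pre_ (elsewhere Python raises IndexError)
def pvObs (v : String) : String := PySem.List.pyGetD (pvSplit v ">") 1 ""

-- ===== PORT A =====
def generate_variant_codon (variants : String) : String :=
  let variant_list := pvSplit variants ", "
  let variant_codons :=
    (PySem.List.pyRange 0 (variant_list.length : Int) 3).foldl
      (fun acc i =>
        let triplet := PySem.List.slice variant_list (some i) (some (i + 3))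
        let codon := PySem.Str.join "" (triplet.map pvObs)
        acc ++ [codon]) []
  PySem.Str.join ", " variant_codons

-- ===== PORT B =====
def generate_variant_codon_alt (variants : String) : String :=
  let st :=
    (pvSplit variants ", ").foldl
      (fun (st : List String × List String) v =>
        if (st.2 ++ [pvObs v]).length = 3 then (st.1 ++ [PySem.Str.join "" (st.2 ++ [pvObs v])], [])
        else (st.1, st.2 ++ [pvObs v]))
      ([], [])
  PySem.Str.join ", " (if st.2 = [] then st.1 else st.1 ++ [PySem.Str.join "" st.2])

-- ===== PRECONDITION & SPEC =====
-- Pre_ excludes exactly the inputs where some entry of variants.split(", ") contains no ">";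
-- on those both A and B raise IndexError at variant.split(">")[1], so A returns no value there.
def Pre_generate_variant_codon (variants : String) : Prop :=
  ∀ v ∈ pvSplit variants ", ", 2 ≤ (pvSplit v ">").length

instance (variants : String) : Decidable (Pre_generate_variant_codon variants) := by
  unfold Pre_generate_variant_codon; infer_instance

def pvWitness_generate_variant_codon : String := "A>C, G>T, C>A, T>G"

def Spec_generate_variant_codon (variants : String) (out : String) : Prop :=
  out = generate_variant_codon_alt variants
instance (variants : String) (out : String) : Decidable (Spec_generate_variant_codon variants out) := by
  unfold Spec_generate_variant_codon; infer_instance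

-- ===== CLAIM (what is proved, stated in full; the proofs are below) =====
def Claim_equal_generate_variant_codon : Prop :=
  ∀ (variants : String), Dom_generate_variant_codon variants →
    Pre_generate_variant_codon variants →
    Spec_generate_variant_codon variants (generate_variant_codon variants)

-- ===== LEMMAS AND PROOFS =====

-- chunks of three (last chunk possibly shorter): the common shape behind both loops
def pvChunks3 {α : Type} : List α → List (List α)
  | [] => []
  | a :: b :: c :: rest => [a, b, c] :: pvChunks3 rest
  | xs => [xs]

-- B's flush of the loop state after the last variant
def pvFinish (st : List String × List String) : List String :=
  if st.2 = [] then st.1 else st.1 ++ [PySem.Str.join "" st.2]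

theorem pv_foldl_append_map {α β : Type} (r : List α) (h : α → β) (acc : List β) :
    r.foldl (fun a x => a ++ [h x]) acc = acc ++ r.map h := by
  induction r generalizing acc with
  | nil => simp
  | cons x xs ih => simp [List.foldl_cons, ih]

theorem pv_range_chunks {α β : Type} (g : List α → β) :
    ∀ ys : List α,
      (List.range ((ys.length + 2) / 3)).map (fun k => g ((ys.drop (3 * k)).take 3))
        = (pvChunks3 ys).map g := by
  intro ys
  induction ys using pvChunks3.induct with
  | case1 => simp [pvChunks3]
  | case2 a b c rest ih =>
      have hlen : (((a :: b :: c :: rest).length + 2) / 3) = (rest.length + 2) / 3 + 1 := by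
        simp only [List.length_cons]; omega
      rw [hlen, List.range_succ_eq_map, List.map_cons, List.map_map]
      simp only [pvChunks3, List.map_cons]
      refine List.cons_eq_cons.mpr ⟨by norm_num, ?_⟩
      rw [← ih]
      apply List.map_congr_left
      intro k _
      simp only [Function.comp]
      have h : 3 * (k + 1) = 3 * k + 1 + 1 + 1 := by ring
      simp [h, List.drop_succ_cons]
  | case3 xs h1 h2 =>
      match xs, h1, h2 with
      | [], h1, _ => exact absurd rfl h1
      | [a], _, _ => simp [pvChunks3]
      | [a, b], _, _ => simp [pvChunks3]
      | a :: b :: c :: rest, _, h2 => exact absurd rfl (h2 a b c rest)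

theorem pv_fold_B {α : Type} (f : α → String) :
    ∀ (ys : List α) (codons cur : List String), cur.length < 3 →
      pvFinish (ys.foldl
          (fun (st : List String × List String) v =>
            if (st.2 ++ [f v]).length = 3 then (st.1 ++ [PySem.Str.join "" (st.2 ++ [f v])], [])
            else (st.1, st.2 ++ [f v]))
          (codons, cur))
        = codons ++ (pvChunks3 (cur ++ ys.map f)).map (PySem.Str.join "") := by
  intro ys
  induction ys with
  | nil =>
      intro codons cur hcur
      match cur, hcur with
      | [], _ => simp [pvFinish, pvChunks3]
      | [a], _ => simp [pvFinish, pvChunks3]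
      | [a, b], _ => simp [pvFinish, pvChunks3]
  | cons v ys ih =>
      intro codons cur hcur
      simp only [List.foldl_cons, List.map_cons]
      by_cases h3 : (cur ++ [f v]).length = 3
      · have h2 : cur.length = 2 := by simp at h3; omega
        match cur, h2 with
        | [a, b], _ =>
            rw [if_pos h3]
            rw [ih (codons ++ [PySem.Str.join "" ([a, b] ++ [f v])]) [] (by norm_num)]
            simp [pvChunks3]
      · rw [if_neg h3]
        rw [ih codons (cur ++ [f v]) (by simp at h3 ⊢; omega)]
        simp

-- the slice the A loop takes, as drop/take on the mapped list
theorem pv_slice_map {α : Type} (l : List α) (f : α → String) (k : Nat) :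
    (PySem.List.slice l (some ((3 * k : Nat) : Int)) (some (((3 * k : Nat) : Int) + 3))).map f
      = ((l.map f).drop (3 * k)).take 3 := by
  have h3 : ((3 : Int)) = ((3 : Nat) : Int) := by norm_num
  rw [h3, PySem.List.slice_natCast_add]
  simp

-- range(0, n, 3) as a mapped List.range
theorem pv_pyRange3 (n : Nat) :
    PySem.List.pyRange 0 (n : Int) 3 =
      (List.range ((n + 2) / 3)).map (fun k => ((3 * k : Nat) : Int)) := by
  rw [PySem.List.pyRange_of_pos 0 (n : Int) (by norm_num)]
  by_cases h : 0 < n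
  · have hlt : (0 : Int) < (n : Int) := by exact_mod_cast h
    rw [if_pos hlt]
    have : ((n : Int) - 0 + 3 - 1) / 3 = (((n + 2) / 3 : Nat) : Int) := by
      push_cast
      omega
    rw [this, Int.toNat_natCast]
    apply List.map_congr_left
    intro k _
    push_cast
    ring
  · have h0 : n = 0 := by omega
    subst h0
    norm_num

-- ===== VERDICT (by name: the statement is the Claim_ definition above) =====
theorem generate_variant_codon_spec : Claim_equal_generate_variant_codon := by
  intro variants _ _
  unfold Spec_generate_variant_codon generate_variant_codon generate_variant_codon_alt
  set l := pvSplit variants ", " with hl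
  dsimp only
  congr 1
  have hA :
      (PySem.List.pyRange 0 (l.length : Int) 3).foldl
        (fun acc i =>
          acc ++ [PySem.Str.join "" ((PySem.List.slice l (some i) (some (i + 3))).map pvObs)]) []
        = (pvChunks3 (l.map pvObs)).map (PySem.Str.join "") := by
    rw [pv_foldl_append_map, List.nil_append, pv_pyRange3 l.length, List.map_map]
    rw [← pv_range_chunks (PySem.Str.join "") (l.map pvObs)]
    simp only [List.length_map]
    apply List.map_congr_left
    intro k _
    simp only [Function.comp]
    rw [pv_slice_map]
  have hB := pv_fold_B pvObs l [] [] (by norm_num)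
  unfold pvFinish at hB
  simp only [List.nil_append] at hB
  rw [hA]
  exact hB.symm
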